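-- pv_equiv track=rewrite | github.com/kamilGie/WDI | Zestaw_3:_Tablice_o_większej_liczbie_wymiarów/prototyp119.py | najdluzszy_fragment
-- ===== SOURCE A (Python) =====
-- def najdluzszy_fragment(t):
--     max_len = 0  # Najdłuższy znaleziony fragment
--     max_row = -1  # Numer wiersza z najdłuższym fragmentem
--
--     for i in range(len(t)):
--         current_value = None  # Aktualna wartość, która jest analizowana
--         current_length = 0  # Długość bieżącego fragmentu
--         max_current_len = 0  # Długość najdłuższego fragmentu w bieżącym wierszu
--
--         # Przechodzimy przez wszystkie elementy w wierszu
--         for j in range(len(t[i])):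
--             if t[i][j] == current_value:  # Jeśli wartość się powtarza
--                 current_length += 1  # Zwiększamy długość fragmentu
--             else:
--                 current_value = t[i][j]  # Zmieniamy wartość
--                 current_length = 1  # Resetujemy długość fragmentu do 1
--
--             # Jeśli bieżący fragment jest dłuższy, zapisujemy go
--             if current_length > max_current_len:
--                 max_current_len = current_length
--
--         if max_current_len > max_len:
--             max_len = max_current_len
--             max_row = i
--
--     return max_row
-- ===== SOURCE B (Python) =====
-- def _najdluzszy_w_wierszu(row):
--     # Longest run = largest gap between consecutive "boundary" positions
--     # (positions where the value changes), with sentinels 0 and len(row).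
--     if not row:
--         return 0
--     n = len(row)
--     edges = [0] + [j for j in range(1, n) if row[j] != row[j - 1]] + [n]
--     return max(b - a for a, b in zip(edges, edges[1:]))
--
--
-- def najdluzszy_fragment(t):
--     lens = [_najdluzszy_w_wierszu(row) for row in t]
--     m = max(lens, default=0)
--     return lens.index(m) if m > 0 else -1
-- ===== Notes on version B (the rewrite author's own statement) =====
-- stated objective: alternative
-- what changed: Replaces A's online per-element run state machine (current_value/current_length/max_current_len and a running best row) by a staged pipeline: per row, collect the boundary positions where the value changes, take the max of adjacent differences of the edge list; then take max() over the precomputed list of row lengths and lens.index() for the first row attaining it.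
import Mathlib
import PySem

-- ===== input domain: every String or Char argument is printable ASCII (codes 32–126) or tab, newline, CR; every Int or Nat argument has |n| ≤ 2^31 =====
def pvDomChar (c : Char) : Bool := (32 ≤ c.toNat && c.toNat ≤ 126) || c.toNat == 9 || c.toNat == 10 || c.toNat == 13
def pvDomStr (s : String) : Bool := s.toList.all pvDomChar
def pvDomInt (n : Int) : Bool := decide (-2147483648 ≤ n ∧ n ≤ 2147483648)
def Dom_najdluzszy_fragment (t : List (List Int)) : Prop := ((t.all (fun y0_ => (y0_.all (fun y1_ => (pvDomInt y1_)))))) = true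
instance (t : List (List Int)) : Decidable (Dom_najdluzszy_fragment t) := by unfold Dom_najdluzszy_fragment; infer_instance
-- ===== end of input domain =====

-- B replaces A's online run state machine by a staged pipeline (boundary positions → adjacent
-- differences → max/index over the precomputed list of row values); same cost, different structure.

-- ===== PORT A =====
-- inner loop of A: state (current_value, current_length, max_current_len) over the row's elements
def pvInnerA : Option Int → Int → Int → List Int → Int
  | _, _, mcl, [] => mcl
  | cv, cl, mcl, x :: xs =>
    if some x = cv then
      pvInnerA cv (cl + 1) (if cl + 1 > mcl then cl + 1 else mcl) xs
    else
      pvInnerA (some x) 1 (if 1 > mcl then 1 else mcl) xs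

-- outer loop of A: row index i, max_len, max_row
def pvOuterA : Int → Int → Int → List (List Int) → Int
  | _, _, mr, [] => mr
  | i, ml, mr, row :: rest =>
    let mcl := pvInnerA none 0 0 row
    if mcl > ml then pvOuterA (i + 1) mcl i rest else pvOuterA (i + 1) ml mr rest

def najdluzszy_fragment (t : List (List Int)) : Int := pvOuterA 0 0 (-1) t

-- ===== PORT B =====
-- edges = [0] + [j for j in range(1, n) if row[j] != row[j-1]] + [n]   (indices 1 ≤ j < n are in range)
def pvEdges (row : List Int) : List Int :=
  0 :: (((PySem.List.pyRange 1 (row.length : Int) 1).filter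
      (fun j => PySem.List.pyGetD row j 0 != PySem.List.pyGetD row (j - 1) 0)) ++ [(row.length : Int)])

-- max(b - a for a, b in zip(edges, edges[1:])) if row else 0   (the generator is nonempty: ≥ 2 edges, so .getD 0 is never taken)
def pvRowLenB (row : List Int) : Int :=
  if row = [] then 0
  else
    let edges := pvEdges row
    (PySem.List.max? ((edges.zip edges.tail).map (fun p => p.2 - p.1)) (fun y => y)).getD 0

-- lens = [...]; m = max(lens, default=0); lens.index(m) if m > 0 else -1   (m ∈ lens when m > 0, so .getD 0 is never taken)
def najdluzszy_fragment_alt (t : List (List Int)) : Int :=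
  let lens := t.map pvRowLenB
  let m := PySem.List.maxD lens (fun y => y) 0
  if 0 < m then (((PySem.List.index? lens m).getD 0 : Nat) : Int) else -1

-- ===== PRECONDITION & SPEC =====
def Spec_najdluzszy_fragment (t : List (List Int)) (out : Int) : Prop := out = najdluzszy_fragment_alt t
instance (t : List (List Int)) (out : Int) : Decidable (Spec_najdluzszy_fragment t out) := by unfold Spec_najdluzszy_fragment; infer_instance

-- ===== CLAIM (what is proved, stated in full; the proofs are below) =====
def Claim_equal_najdluzszy_fragment : Prop := ∀ (t : List (List Int)), Dom_najdluzszy_fragment t → Spec_najdluzszy_fragment t (najdluzszy_fragment t)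

-- ===== LEMMAS AND PROOFS =====

-- proof-side: the list of run lengths of v^n ++ xs (maximal runs, in order)
def pvRuns : Int → Int → List Int → List Int
  | _, n, [] => [n]
  | v, n, x :: xs => if x = v then pvRuns v (n + 1) xs else n :: pvRuns x 1 xs

-- proof-side: the boundary positions after position p (current value v), closed with the final edge
def pvStarts : Int → Int → List Int → List Int
  | _, p, [] => [p]
  | v, p, x :: xs => if x = v then pvStarts x (p + 1) xs else p :: pvStarts x (p + 1) xs

def pvDiffs (l : List Int) : List Int := (l.zip l.tail).map (fun p => p.2 - p.1)

lemma pv_foldl_max_zero (l : List Int) : ∀ a : Int, 0 ≤ a → l.foldl max a = max a (l.foldl max 0) := by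
  induction l with
  | nil => intro a ha; simp [List.foldl]; omega
  | cons x xs ih =>
    intro a ha
    simp only [List.foldl]
    rw [ih (max a x) (by omega), ih (max 0 x) (by omega)]
    omega

lemma pv_le_fold_runs (xs : List Int) : ∀ v n : Int, n ≤ (pvRuns v n xs).foldl max 0 := by
  induction xs with
  | nil => intro v n; simp only [pvRuns, List.foldl]; omega
  | cons x xs ih =>
    intro v n
    by_cases h : x = v
    · simp [pvRuns, h]
      have := ih v (n + 1)
      omega
    · simp [pvRuns, h]
      have := (PySem.List.le_foldl_max (pvRuns x 1 xs) (max 0 n)).1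
      omega

lemma pv_inner_eq (xs : List Int) : ∀ v n m : Int, 1 ≤ n → n ≤ m →
    pvInnerA (some v) n m xs = max m ((pvRuns v n xs).foldl max 0) := by
  induction xs with
  | nil =>
    intro v n m h1 h2
    simp [pvInnerA, pvRuns, List.foldl]
    omega
  | cons x xs ih =>
    intro v n m h1 h2
    by_cases h : x = v
    · simp [pvInnerA, h, pvRuns]
      have hle := pv_le_fold_runs xs v (n + 1)
      rw [ih v (n + 1) (if m ≤ n then n + 1 else m) (by omega) (by split <;> omega)]
      omega
    · simp [pvInnerA, h, pvRuns]
      rw [if_neg (by omega), ih x 1 m (by omega) (by omega),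
        pv_foldl_max_zero (pvRuns x 1 xs) (max 0 n) (by omega)]
      omega

-- max_current_len only grows in A's inner loop
lemma pv_inner_ge (xs : List Int) : ∀ cv cl mcl, mcl ≤ pvInnerA cv cl mcl xs := by
  induction xs with
  | nil => intro cv cl mcl; simp [pvInnerA]
  | cons x xs ih =>
    intro cv cl mcl
    simp only [pvInnerA]
    split
    · split
      · have := ih cv (cl + 1) (cl + 1); omega
      · exact ih cv (cl + 1) mcl
    · split
      · have := ih (some x) 1 1; omega
      · exact ih (some x) 1 mcl

-- adjacent differences of the boundary list are exactly the run lengths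
lemma pv_diffs_cons₂ (a b : Int) (l : List Int) :
    pvDiffs (a :: b :: l) = (b - a) :: pvDiffs (b :: l) := by
  simp [pvDiffs]

lemma pv_diffs_starts (xs : List Int) : ∀ (v c p : Int),
    pvDiffs (c :: pvStarts v p xs) = pvRuns v (p - c) xs := by
  induction xs with
  | nil => intro v c p; simp [pvStarts, pvRuns, pvDiffs]
  | cons x xs ih =>
    intro v c p
    by_cases h : x = v
    · subst h
      simp only [pvStarts, pvRuns, ite_true]
      rw [ih x c (p + 1)]
      congr 1
      omega
    · simp only [pvStarts, pvRuns, if_neg h, pv_diffs_cons₂]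
      have h1 : p + 1 - p = (1 : Int) := by omega
      have := ih x p (p + 1)
      rw [h1] at this
      rw [this]

-- the port's filtered range, with the closing edge, is pvStarts
lemma pv_filter_starts : ∀ (k : Nat) (row : List Int) (p : Nat), 1 ≤ p → p + k = row.length →
    ((PySem.List.pyRange (p : Int) (row.length : Int) 1).filter
        (fun j => PySem.List.pyGetD row j 0 != PySem.List.pyGetD row (j - 1) 0)) ++ [(row.length : Int)]
      = pvStarts (row.getD (p - 1) 0) (p : Int) (row.drop p) := by
  intro k
  induction k with
  | zero =>
    intro row p h1 h2
    have hlen : (row.length : Int) = (p : Int) := by omega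
    rw [hlen, PySem.List.pyRange_one_eq_nil (by omega)]
    have : row.drop p = [] := List.drop_eq_nil_of_le (by omega)
    simp [this, pvStarts]
  | succ k ih =>
    intro row p h1 h2
    have hp : p < row.length := by omega
    rw [PySem.List.pyRange_one_cons (by exact_mod_cast hp)]
    have hdrop : row.drop p = row[p] :: row.drop (p + 1) := List.drop_eq_getElem_cons hp
    have hgp : PySem.List.pyGetD row (p : Int) 0 = row[p] := by
      rw [PySem.List.pyGetD_natCast]; exact List.getD_eq_getElem row 0 hp
    have hgp1 : PySem.List.pyGetD row ((p : Int) - 1) 0 = row.getD (p - 1) 0 := by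
      have : (p : Int) - 1 = ((p - 1 : Nat) : Int) := by omega
      rw [this, PySem.List.pyGetD_natCast]
    have hrec := ih row (p + 1) (by omega) (by omega)
    have hcast : ((p + 1 : Nat) : Int) = (p : Int) + 1 := by push_cast; ring
    rw [hcast] at hrec
    have hget1 : row.getD ((p + 1) - 1) 0 = row[p] := by
      simpa using List.getD_eq_getElem row 0 hp
    rw [hget1] at hrec
    rw [hdrop, List.filter_cons]
    simp only [hgp, hgp1]
    by_cases h : row[p] = row.getD (p - 1) 0
    · rw [if_neg (by simp [h])]
      simp only [pvStarts, if_pos h]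
      exact hrec
    · rw [if_pos (by simpa [List.getD] using h)]
      simp only [pvStarts, if_neg h, List.cons_append]
      rw [hrec]

-- the run-length list starting with count n has a head ≥ n
lemma pv_runs_head (xs : List Int) : ∀ (v n : Int), ∃ d ds, pvRuns v n xs = d :: ds ∧ n ≤ d := by
  induction xs with
  | nil => intro v n; exact ⟨n, [], rfl, le_refl n⟩
  | cons x xs ih =>
    intro v n
    by_cases h : x = v
    · obtain ⟨d, ds, he, hd⟩ := ih v (n + 1)
      exact ⟨d, ds, by simp [pvRuns, h, he], by omega⟩
    · exact ⟨n, pvRuns x 1 xs, by simp [pvRuns, h], le_refl n⟩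

-- per-row agreement: A's state machine computes B's staged row length
lemma pv_row_eq (row : List Int) : pvInnerA none 0 0 row = pvRowLenB row := by
  cases row with
  | nil => simp [pvInnerA, pvRowLenB]
  | cons x xs =>
    have hedge : pvEdges (x :: xs) = 0 :: pvStarts x 1 xs := by
      have := pv_filter_starts xs.length (x :: xs) 1 (by omega) (by simp [Nat.add_comm])
      simp only [Nat.cast_one] at this
      simpa [pvEdges] using congrArg (List.cons 0) this
    obtain ⟨d, ds, hruns, hd⟩ := pv_runs_head xs x 1
    have hdiffs : pvDiffs (pvEdges (x :: xs)) = d :: ds := by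
      rw [hedge, pv_diffs_starts xs x 0 1]
      simpa using hruns
    have hB : pvRowLenB (x :: xs) = ds.foldl max d := by
      simp only [pvRowLenB, if_neg (by simp : ¬(x :: xs = []))]
      show (PySem.List.max? (pvDiffs (pvEdges (x :: xs))) (fun y => y)).getD 0 = _
      rw [hdiffs, PySem.List.max?_id_cons]
      rfl
    have hA : pvInnerA none 0 0 (x :: xs) = max 1 ((pvRuns x 1 xs).foldl max 0) := by
      show pvInnerA (some x) 1 (if (1:Int) > 0 then 1 else 0) xs = _
      rw [if_pos (by omega)]
      exact pv_inner_eq xs x 1 1 (by omega) (by omega)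
    rw [hA, hB, hruns]
    have h1 : (d :: ds).foldl max 0 = ds.foldl max d := by
      simp only [List.foldl]
      congr 1; omega
    rw [h1]
    have := (PySem.List.le_foldl_max ds d).1
    omega

-- outer agreement: A's running best over rows vs max + first index over the precomputed lens
lemma pv_outer_eq (rows : List (List Int)) : ∀ (k : Nat) (ml mr : Int), 0 ≤ ml →
    pvOuterA (k : Int) ml mr rows =
      (if ml < (rows.map pvRowLenB).foldl max ml
       then (k : Int) + (((PySem.List.index? (rows.map pvRowLenB) ((rows.map pvRowLenB).foldl max ml)).getD 0 : Nat) : Int)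
       else mr) := by
  induction rows with
  | nil => intro k ml mr h; simp [pvOuterA]
  | cons row rest ih =>
    intro k ml mr hml
    have hrow : pvInnerA none 0 0 row = pvRowLenB row := pv_row_eq row
    set r := pvRowLenB row with hr
    simp only [pvOuterA, hrow, List.map_cons, List.foldl_cons]
    by_cases hlt : r > ml
    · rw [if_pos hlt]
      have h0r : 0 ≤ r := by omega
      have hIH := ih (k + 1) r ((k : Int)) h0r
      push_cast at hIH
      rw [hIH]
      have hmax : max ml r = r := by omega
      rw [hmax]
      set m := (rest.map pvRowLenB).foldl max r with hm
      have hrm : r ≤ m := (PySem.List.le_foldl_max _ r).1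
      by_cases hcase : r < m
      · have hne : r ≠ m := by omega
        have hmem : m ∈ rest.map pvRowLenB := by
          rcases PySem.List.foldl_max_mem (rest.map pvRowLenB) r with h | h
          · omega
          · exact h
        obtain ⟨j, hj⟩ := Option.isSome_iff_exists.mp ((PySem.List.index?_isSome_iff _ _).mpr hmem)
        rw [if_pos hcase, if_pos (show ml < m by omega),
          PySem.List.index?_cons_of_ne _ hne, hj]
        simp only [Option.map_some, Option.getD_some]
        push_cast; ring
      · have hrm' : r = m := by omega
        rw [if_neg hcase, if_pos (show ml < m by omega), ← hrm', PySem.List.index?_cons_self]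
        simp
    · rw [if_neg hlt]
      have hIH := ih (k + 1) ml mr hml
      push_cast at hIH
      rw [hIH]
      have hmax : max ml r = ml := by omega
      rw [hmax]
      set m := (rest.map pvRowLenB).foldl max ml with hm
      by_cases hcase : ml < m
      · have hne : r ≠ m := by omega
        have hmem : m ∈ rest.map pvRowLenB := by
          rcases PySem.List.foldl_max_mem (rest.map pvRowLenB) ml with h | h
          · omega
          · exact h
        obtain ⟨j, hj⟩ := Option.isSome_iff_exists.mp ((PySem.List.index?_isSome_iff _ _).mpr hmem)
        rw [if_pos hcase, if_pos hcase, PySem.List.index?_cons_of_ne _ hne, hj]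
        simp only [Option.map_some, Option.getD_some]
        push_cast; ring
      · rw [if_neg hcase, if_neg hcase]

-- every row length is nonnegative
lemma pv_rowlen_nonneg (row : List Int) : 0 ≤ pvRowLenB row := by
  rw [← pv_row_eq]
  exact pv_inner_ge row none 0 0

-- ===== VERDICT (by name: the statement is the Claim_ definition above) =====
theorem najdluzszy_fragment_spec : Claim_equal_najdluzszy_fragment := by
  intro t _
  show najdluzszy_fragment t = najdluzszy_fragment_alt t
  have hO := pv_outer_eq t 0 0 (-1) (by omega)
  simp only [Nat.cast_zero] at hO
  simp only [najdluzszy_fragment, hO, najdluzszy_fragment_alt]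
  cases ht : t.map pvRowLenB with
  | nil => simp [PySem.List.maxD, PySem.List.max?]
  | cons x xs =>
    have hx : 0 ≤ x := by
      have : x ∈ t.map pvRowLenB := by rw [ht]; exact List.mem_cons_self
      obtain ⟨row, _, hrow⟩ := List.mem_map.mp this
      rw [← hrow]; exact pv_rowlen_nonneg row
    have hmaxD : PySem.List.maxD (x :: xs) (fun y => y) 0 = xs.foldl max x := by
      simp [PySem.List.maxD, PySem.List.max?_id_cons]
    have hfold : (x :: xs).foldl max 0 = xs.foldl max x := by
      simp only [List.foldl]
      congr 1; omega
    rw [hmaxD, hfold]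
    by_cases h : 0 < xs.foldl max x
    · rw [if_pos h, if_pos h]; ring
    · rw [if_neg h, if_neg h]
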